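-- pv_equiv track=rewrite | github.com/B-Ilyas/TMEs-Python | Thème 9.py | compo_dico
-- ===== SOURCE A (Python) =====
-- from typing import Dict, Set
--
-- def compo_dico(dico1:Dict[str,str], dico2:Dict[str,str])->Dict[str,str]:
--     c1:str
--     dicor:Dict[str,str] = dict()
--     for c1 in dico1:
--         c2:str
--         for c2 in dico2:
--             if dico1[c1] == c2:
--                 dicor[c1]= dico2[c2]
--     return dicor
-- ===== SOURCE B (Python) =====
-- def compo_dico(dico1, dico2):
--     # Single pass over dico1: one direct lookup in dico2 per entry,
--     # instead of rescanning all of dico2's keys for every key of dico1.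
--     return {c1: dico2[v] for c1, v in dico1.items() if v in dico2}
-- ===== Notes on version B (the rewrite author's own statement) =====
-- stated objective: faster
-- what changed: Replaces the nested scan of dico2's keys for every key of dico1 by a single dict-comprehension pass over dico1 that uses one hash lookup in dico2 per entry.
import Mathlib
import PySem

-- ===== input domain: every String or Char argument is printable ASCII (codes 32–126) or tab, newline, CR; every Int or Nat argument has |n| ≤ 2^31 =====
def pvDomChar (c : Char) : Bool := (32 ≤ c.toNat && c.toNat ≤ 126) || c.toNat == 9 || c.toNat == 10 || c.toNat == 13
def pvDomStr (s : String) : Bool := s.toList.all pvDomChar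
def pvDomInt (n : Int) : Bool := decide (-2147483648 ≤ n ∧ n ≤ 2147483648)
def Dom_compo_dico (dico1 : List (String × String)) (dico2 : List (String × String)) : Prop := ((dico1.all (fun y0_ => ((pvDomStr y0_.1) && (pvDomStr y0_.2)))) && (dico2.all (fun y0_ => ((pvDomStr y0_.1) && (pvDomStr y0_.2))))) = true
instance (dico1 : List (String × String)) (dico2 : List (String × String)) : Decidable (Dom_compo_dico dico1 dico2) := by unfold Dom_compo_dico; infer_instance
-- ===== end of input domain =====

-- B replaces A's nested scan of dico2's keys for every key of dico1 by one pass over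
-- dico1's items with a single direct lookup in dico2 per entry (faster).

-- ===== PORT A =====
-- for c1 in dico1: for c2 in dico2: if dico1[c1] == c2: dicor[c1] = dico2[c2]
def compo_dico (dico1 : List (String × String)) (dico2 : List (String × String)) : List (String × String) :=
  let d1 := PySem.Dict.ofList dico1
  let d2 := PySem.Dict.ofList dico2
  let dicor : PySem.Dict String String :=
    d1.keys.foldl (fun r c1 =>
      d2.keys.foldl (fun r c2 =>
        if d1.getD c1 "" == c2 then r.insert c1 (d2.getD c2 "") else r) r)
      PySem.Dict.empty
  dicor.items

-- ===== PORT B =====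
-- {c1: dico2[v] for c1, v in dico1.items() if v in dico2}
def compo_dico_alt (dico1 : List (String × String)) (dico2 : List (String × String)) : List (String × String) :=
  let d2 := PySem.Dict.ofList dico2
  let dicor : PySem.Dict String String :=
    (PySem.Dict.ofList dico1).items.foldl (fun r p =>
      match d2.get? p.2 with
      | some w => r.insert p.1 w
      | none => r)
      PySem.Dict.empty
  dicor.items

-- ===== PRECONDITION & SPEC =====
def Spec_compo_dico (dico1 : List (String × String)) (dico2 : List (String × String)) (out : List (String × String)) : Prop := out = compo_dico_alt dico1 dico2
instance (dico1 : List (String × String)) (dico2 : List (String × String)) (out : List (String × String)) : Decidable (Spec_compo_dico dico1 dico2 out) := by unfold Spec_compo_dico; infer_instance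

-- ===== CLAIM (what is proved, stated in full; the proofs are below) =====
def Claim_equal_compo_dico : Prop := ∀ (dico1 : List (String × String)) (dico2 : List (String × String)), Dom_compo_dico dico1 dico2 → Spec_compo_dico dico1 dico2 (compo_dico dico1 dico2)

-- ===== LEMMAS AND PROOFS =====

-- A fold whose guard never fires leaves the accumulator unchanged.
theorem fold_if_id (l : List (String × String)) (c1 v : String)
    (r : PySem.Dict String String) (h : ∀ p ∈ l, v ≠ p.1) :
    l.foldl (fun r p => if v == p.1 then r.insert c1 p.2 else r) r = r := by
  induction l generalizing r with
  | nil => rfl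
  | cons q t ih =>
      have hq : (v == q.1) = false := by simpa using h q (List.mem_cons_self)
      simp only [List.foldl_cons, hq, Bool.false_eq_true, if_false]
      exact ih r (fun p hp => h p (List.mem_cons_of_mem _ hp))

-- A linear scan over an association list with distinct keys is a single lookup.
theorem fold_scan_eq_lookup (l : List (String × String)) (hl : (l.map Prod.fst).Nodup)
    (r : PySem.Dict String String) (c1 v : String) :
    l.foldl (fun r p => if v == p.1 then r.insert c1 p.2 else r) r =
      (match (PySem.Dict.mk l).get? v with
       | some w => r.insert c1 w
       | none => r) := by
  induction l generalizing r with
  | nil => simp [PySem.Dict.get?]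
  | cons q t ih =>
      obtain ⟨k, w⟩ := q
      rw [PySem.Dict.get?_mk_cons]
      simp only [List.map_cons, List.nodup_cons] at hl
      by_cases hv : v = k
      · subst hv
        simp only [List.foldl_cons, beq_self_eq_true, if_true]
        exact fold_if_id t c1 v (r.insert c1 w)
          (fun p hp hvp => hl.1 (hvp ▸ List.mem_map_of_mem hp))
      · have h1 : (v == k) = false := by simp [hv]
        have h2 : (k == v) = false := by simp; exact fun h => hv h.symm
        simp only [List.foldl_cons, h1, h2, Bool.false_eq_true, if_false]
        exact ih hl.2 r

-- The two accumulation loops build the same result dictionary.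
theorem main_eq (d1 d2 : PySem.Dict String String)
    (h1 : d1.keys.Nodup) (h2 : d2.keys.Nodup) :
    d1.keys.foldl (fun r c1 =>
        d2.keys.foldl (fun r c2 =>
          if d1.getD c1 "" == c2 then r.insert c1 (d2.getD c2 "") else r) r)
      PySem.Dict.empty =
    d1.items.foldl (fun r p =>
        match d2.get? p.2 with
        | some w => r.insert p.1 w
        | none => r)
      PySem.Dict.empty := by
  rw [PySem.Dict.items_eq_map_keys d1 h1 "", List.foldl_map]
  apply PySem.List.foldl_congr_mem
  intro r c1 _
  have hkeys : d2.keys = d2.items.map Prod.fst := rfl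
  rw [hkeys, List.foldl_map]
  rw [PySem.List.foldl_congr_mem d2.items
      (fun r p => if d1.getD c1 "" == p.1 then r.insert c1 (d2.getD p.1 "") else r)
      (fun r p => if d1.getD c1 "" == p.1 then r.insert c1 p.2 else r) r
      (fun acc p hp => by
        obtain ⟨pk, pv⟩ := p
        simp only
        rw [PySem.Dict.getD_of_mem_items d2 hp h2])]
  rw [fold_scan_eq_lookup d2.items h2 r c1 (d1.getD c1 "")]

-- ===== VERDICT (by name: the statement is the Claim_ definition above) =====
theorem compo_dico_spec : Claim_equal_compo_dico := by
  intro dico1 dico2 _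
  unfold Spec_compo_dico
  show compo_dico dico1 dico2 = compo_dico_alt dico1 dico2
  simp only [compo_dico, compo_dico_alt]
  exact congrArg PySem.Dict.items
    (main_eq _ _ (PySem.Dict.nodup_keys_ofList dico1) (PySem.Dict.nodup_keys_ofList dico2))
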